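-- pv_equiv track=rewrite | github.com/joshanashakya/dissertation | workspace/dataset/java-python/GeeksForGeeks/1100/A/2.py | sumFactors
-- ===== SOURCE A (Python) =====
-- from collections import defaultdict
--
-- MAXN = 1000001
--
-- MAXN_sqrt = int(MAXN ** (0.5))
--
-- spf = [None] * (MAXN)
--
-- def sieve():
--
--     spf[1] = 1
--     for i in range(2, MAXN):
--
--         # Marking smallest prime factor
--         # for every number to be itself.
--         spf[i] = i
--
--     # Separately marking spf for every
--     # even number as 2
--     for i in range(4, MAXN, 2):
--         spf[i] = 2
--
--     for i in range(3, MAXN_sqrt):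
--
--         # If i is prime
--         if spf[i] == i:
--
--             # Marking SPF for all numbers
--             # divisible by i
--             for j in range(i * i, MAXN, i):
--
--                 # Marking spf[j] if it is
--                 # not previously marked
--                 if spf[j] == j:
--                     spf[j] = i
--
-- def sumFactors(arr, n):
--
--     # Function call to calculate smallest
--     # prime factors of all the numbers upto MAXN
--     sieve()
--
--     # Create map for each element
--     Map = defaultdict(lambda:0)
--
--     for i in range(0, n):
--         Map[arr[i]] = 1
--
--     Sum = 0
--
--     for i in range(0, n):
--         num = arr[i]
--
--         # If smallest prime factor of num
--         # is present in array
--         while num != 1 and Map[spf[num]] == 1: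
--             num = num // spf[num]
--
--         # Each factor of arr[i] is present
--         # in the array
--         if num == 1:
--             Sum += arr[i]
--
--     return Sum
-- ===== SOURCE B (Python) =====
-- def sumFactors(arr, n):
--     # Sum the first n elements all of whose prime factors also occur among the
--     # first n elements; per-element trial division up to sqrt, no global sieve.
--     present = set(arr[:n])
--     total = 0
--     for i in range(0, n):
--         num = arr[i]
--         x = num
--         ok = True
--         d = 2
--         while d * d <= x:
--             if x % d == 0:
--                 if d not in present:
--                     ok = False
--                     break
--                 while x % d == 0:
--                     x = x // d
--             d = d + 1
--         if ok and (x == 1 or x in present):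
--             total += num
--     return total
-- ===== Notes on version B (the rewrite author's own statement) =====
-- stated objective: alternative
-- what changed: B drops A's per-call smallest-prime-factor sieve over the fixed range [0,1000001) and instead trial-divides each element up to its square root, checking each prime factor against a set of the first n elements.
-- outside the precondition, e.g. on sumFactors([-5], 1): A returns 0, B returns -5; on sumFactors([1000001, 3], 2): A raises IndexError, B returns 3
import Mathlib
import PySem

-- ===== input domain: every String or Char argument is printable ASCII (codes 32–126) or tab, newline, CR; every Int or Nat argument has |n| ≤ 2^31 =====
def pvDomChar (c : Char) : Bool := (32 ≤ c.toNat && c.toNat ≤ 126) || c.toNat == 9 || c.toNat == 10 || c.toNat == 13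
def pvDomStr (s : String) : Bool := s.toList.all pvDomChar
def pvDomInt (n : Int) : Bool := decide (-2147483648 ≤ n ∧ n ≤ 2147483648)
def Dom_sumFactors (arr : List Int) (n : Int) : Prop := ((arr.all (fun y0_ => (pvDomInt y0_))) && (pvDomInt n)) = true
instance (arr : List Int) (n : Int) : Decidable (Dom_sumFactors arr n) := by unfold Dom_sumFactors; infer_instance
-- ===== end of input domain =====

-- B replaces A's per-call smallest-prime-factor sieve over [0, 1000001) by per-element
-- trial division up to the square root, checking factors against a set of the first n elements.

-- ===== PORT A =====
-- sieve(): spf = [None]*MAXN; spf[1] = 1; then the three marking loops.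
-- MAXN = 1000001; MAXN_sqrt = int(MAXN ** 0.5) = 1000 (the float expression is a constant; ported as the literal 1000).
def pvSieveA1 : Array (Option Int) :=
  (Array.replicate 1000001 (none : Option Int)).setIfInBounds 1 (some 1)

-- for i in range(2, MAXN): spf[i] = i
def pvSieveA2 : Array (Option Int) :=
  (PySem.List.pyRange 2 1000001 1).foldl (fun a i => a.setIfInBounds i.toNat (some i)) pvSieveA1

-- for i in range(4, MAXN, 2): spf[i] = 2
def pvSieveA3 : Array (Option Int) :=
  (PySem.List.pyRange 4 1000001 2).foldl (fun a i => a.setIfInBounds i.toNat (some 2)) pvSieveA2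

-- for j in range(i*i, MAXN, i): if spf[j] == j: spf[j] = i
def pvSieveInner (a : Array (Option Int)) (i : Int) : Array (Option Int) :=
  (PySem.List.pyRange (i * i) 1000001 i).foldl
    (fun b j => if b[j.toNat]? = some (some j) then b.setIfInBounds j.toNat (some i) else b) a

-- for i in range(3, MAXN_sqrt): if spf[i] == i: <inner loop>
def pvSieveStep (a : Array (Option Int)) (i : Int) : Array (Option Int) :=
  if a[i.toNat]? = some (some i) then pvSieveInner a i else a

def pvSieve : Array (Option Int) :=
  (PySem.List.pyRange 3 1000 1).foldl pvSieveStep pvSieveA3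

-- Python spf[num]: a negative index wraps by len(spf) = MAXN; an out-of-range index raises
-- IndexError, rendered as `none` here (excluded by Pre_); a stored None is also `none`.
def pvSpfGet (a : Array (Option Int)) (i : Int) : Option Int :=
  match a[(if i < 0 then i + 1000001 else i).toNat]? with
  | some v => v
  | none => none

-- while num != 1 and Map[spf[num]] == 1: num = num // spf[num]
-- (fuel-based totalization; inside Pre_ the fuel num.toNat + 1 always suffices.
--  Map[None] == 0 for a defaultdict, so a `none` entry exits the loop.)
def pvChainA (spf : Array (Option Int)) (map : PySem.Dict Int Int) : Nat → Int → Int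
  | 0, num => num
  | fuel + 1, num =>
    match pvSpfGet spf num with
    | none => num
    | some p =>
      if num ≠ 1 ∧ map.getD p 0 = 1 then pvChainA spf map fuel (PySem.Int.floordiv num p)
      else num

def sumFactors (arr : List Int) (n : Int) : Int :=
  let spf := pvSieve
  let map := (PySem.List.pyRange 0 n 1).foldl
    (fun d i => d.insert (PySem.List.pyGetD arr i 0) (1 : Int)) PySem.Dict.empty
  (PySem.List.pyRange 0 n 1).foldl
    (fun s i =>
      let num := PySem.List.pyGetD arr i 0
      if pvChainA spf map (num.toNat + 1) num = 1 then s + PySem.List.pyGetD arr i 0 else s)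
    0

-- ===== PORT B =====
-- while x % d == 0: x = x // d   (fuel-based totalization; x.toNat + 1 suffices for x ≥ 1)
def pvStrip : Nat → Int → Int → Int
  | 0, x, _ => x
  | fuel + 1, x, d => if PySem.Int.mod x d = 0 then pvStrip fuel (PySem.Int.floordiv x d) d else x

-- the trial-division loop of B; the value returned is Source B's `ok and (x == 1 or x in present)`
-- (fuel-based totalization; at fuel 0 the loop-exit value is returned, never reached inside Pre_)
def pvCheck (present : PySem.Set Int) : Nat → Int → Int → Bool
  | 0, x, _ => decide (x = 1) || present.contains x
  | fuel + 1, x, d =>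
    if d * d ≤ x then
      if PySem.Int.mod x d = 0 then
        if present.contains d then pvCheck present fuel (pvStrip (x.toNat + 1) x d) (d + 1)
        else false
      else pvCheck present fuel x (d + 1)
    else decide (x = 1) || present.contains x

def sumFactors_alt (arr : List Int) (n : Int) : Int :=
  let present : PySem.Set Int := PySem.Set.ofList (PySem.List.slice arr none (some n))
  (PySem.List.pyRange 0 n 1).foldl
    (fun s i =>
      let num := PySem.List.pyGetD arr i 0
      if pvCheck present (2 * num.toNat + 2) num 2 then s + num else s)
    0

-- ===== PRECONDITION & SPEC =====
-- Pre_ excludes n > len(arr), on which A raises IndexError, and first-n elements outside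
-- [0, 1000001): elements ≥ 1000001 make A raise IndexError, and negative elements reach the
-- sieve through Python's negative-index wraparound, where A either loops forever or
-- accidentally skips the element.
def Pre_sumFactors (arr : List Int) (n : Int) : Prop :=
  n ≤ PySem.List.len arr ∧ ∀ x ∈ arr.take n.toNat, 0 ≤ x ∧ x < 1000001
instance (arr : List Int) (n : Int) : Decidable (Pre_sumFactors arr n) := by
  unfold Pre_sumFactors; infer_instance

def pvWitness_sumFactors : List Int × Int := ([4, 2, 7], 3)


def Spec_sumFactors (arr : List Int) (n : Int) (out : Int) : Prop := out = sumFactors_alt arr n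
instance (arr : List Int) (n : Int) (out : Int) : Decidable (Spec_sumFactors arr n out) := by
  unfold Spec_sumFactors; infer_instance

-- ===== CLAIM (what is proved, stated in full; the proofs are below) =====
def Claim_equal_sumFactors : Prop := ∀ (arr : List Int) (n : Int), Dom_sumFactors arr n → Pre_sumFactors arr n → Spec_sumFactors arr n (sumFactors arr n)

-- ===== LEMMAS AND PROOFS =====
lemma pvFoldlSize (L : List Int) (g : Array (Option Int) → Int → Array (Option Int))
    (hg : ∀ a i, (g a i).size = a.size) (a : Array (Option Int)) :
    (L.foldl g a).size = a.size := by
  induction L generalizing a with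
  | nil => rfl
  | cons i t ih => simpa [List.foldl_cons, hg] using (ih (g a i)).trans (hg a i)

-- an unconditional marking loop, entry by entry
lemma pvSetFoldlGet (L : List Int) (f : Int → Option Int) (a : Array (Option Int))
    (hL : ∀ i ∈ L, 0 ≤ i ∧ i.toNat < a.size) (k : Nat) :
    (L.foldl (fun A i => A.setIfInBounds i.toNat (f i)) a)[k]? =
      if (k : Int) ∈ L then some (f (k : Int)) else a[k]? := by
  induction L generalizing a with
  | nil => simp
  | cons i t ih =>
    obtain ⟨hi0, hisz⟩ := hL i (by simp)
    have hsz : (a.setIfInBounds i.toNat (f i)).size = a.size := Array.size_setIfInBounds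
    rw [List.foldl_cons, ih (a.setIfInBounds i.toNat (f i))
      (fun j hj => by rw [hsz]; exact hL j (by simp [hj]))]
    by_cases hmem : (k : Int) ∈ t
    · simp [hmem]
    · by_cases hik : (k : Int) = i
      · have hkn : i.toNat = k := by omega
        have hklt : k < a.size := hkn ▸ hisz
        simp only [hmem, if_false, List.mem_cons, hik, true_or, if_true,
          Array.getElem?_setIfInBounds, hkn, if_pos rfl, hklt, hik]
        split <;> rfl
      · have hne : i.toNat ≠ k := by omega
        simp [hmem, hik, Array.getElem?_setIfInBounds, hne]

-- the conditional inner marking loop, entry by entry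
lemma pvCondFoldlGet (L : List Int) (i0 : Int) (a : Array (Option Int))
    (hL : ∀ j ∈ L, 0 ≤ j ∧ i0 ≠ j) (k : Nat) :
    (L.foldl (fun b j => if b[j.toNat]? = some (some j) then b.setIfInBounds j.toNat (some i0) else b) a)[k]? =
      if (k : Int) ∈ L ∧ a[k]? = some (some (k : Int)) then some (some i0) else a[k]? := by
  induction L generalizing a with
  | nil => simp
  | cons j t ih =>
    obtain ⟨hj0, hij⟩ := hL j (by simp)
    rw [List.foldl_cons]
    by_cases hcond : a[j.toNat]? = some (some j)
    · rw [if_pos hcond, ih _ (fun j' hj' => hL j' (by simp [hj']))]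
      by_cases hjk : j.toNat = k
      · have hjk' : (k : Int) = j := by omega
        have hk : a[k]? = some (some (k : Int)) := by
          rw [← hjk, hcond, Int.toNat_of_nonneg hj0]
        have hsz : j.toNat < a.size := by
          by_contra h
          rw [Array.getElem?_eq_none_iff.2 (by omega)] at hcond
          cases hcond
        have hset : (a.setIfInBounds j.toNat (some i0))[k]? = some (some i0) := by
          simp [Array.getElem?_setIfInBounds, hjk, hjk ▸ hsz]
        rw [hset]
        have hne : ¬ ((k : Int) ∈ t ∧ (some (some i0) : Option (Option Int)) = some (some (k : Int))) := by
          rintro ⟨-, h⟩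
          simp only [Option.some.injEq] at h
          exact hij (by omega)
        rw [if_neg hne, if_pos ⟨by simp [hjk'], hk⟩]
      · have hset : (a.setIfInBounds j.toNat (some i0))[k]? = a[k]? := by
          simp [Array.getElem?_setIfInBounds, hjk]
        rw [hset]
        have hmem : ((k : Int) ∈ j :: t) ↔ ((k : Int) ∈ t) := by
          simp only [List.mem_cons, or_iff_right_iff_imp]
          intro h; omega
        simp only [hmem]
    · rw [if_neg hcond, ih _ (fun j' hj' => hL j' (by simp [hj']))]
      by_cases hjk : (k : Int) = j
      · have hk : a[k]? ≠ some (some (k : Int)) := by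
          have h1 : j.toNat = k := by omega
          rw [← h1, Int.toNat_of_nonneg hj0]
          exact hcond
        simp only [hk, and_false, if_neg, if_false]
      · have hmem : ((k : Int) ∈ j :: t) ↔ ((k : Int) ∈ t) := by simp [hjk]
        simp only [hmem]

-- sieve invariant: every entry in [2, MAXN) is some prime divisor of its index or the index
-- itself; primes keep their own index; composites with a small least factor are marked.
def PvInv (a : Array (Option Int)) (bound : Nat) : Prop :=
  a.size = 1000001 ∧
  a[0]? = some none ∧
  a[1]? = some (some 1) ∧
  (∀ k : Nat, 2 ≤ k → k < 1000001 →
    ∃ p : Nat, a[k]? = some (some (p : Int)) ∧ (p = k ∨ (p.Prime ∧ p ∣ k ∧ p < k))) ∧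
  (∀ k : Nat, k < 1000001 → Nat.Prime k → a[k]? = some (some (k : Int))) ∧
  (∀ k : Nat, 2 ≤ k → k < 1000001 → ¬ k.Prime → k.minFac < bound →
    a[k]? ≠ some (some (k : Int)))

lemma pvSieveA1Size : pvSieveA1.size = 1000001 := by
  simp [pvSieveA1]

lemma pvSieveA1Get (k : Nat) (hk : k < 1000001) :
    pvSieveA1[k]? = some (if k = 1 then some 1 else none) := by
  unfold pvSieveA1
  by_cases h1 : k = 1
  · simp [h1, Array.getElem?_setIfInBounds, Array.getElem?_replicate]
  · simp [h1, Array.getElem?_setIfInBounds, Array.getElem?_replicate, hk,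
      show (1:Nat) ≠ k by omega]

lemma pvSieveA2Size : pvSieveA2.size = 1000001 := by
  unfold pvSieveA2
  rw [pvFoldlSize _ _ (fun a i => Array.size_setIfInBounds)]
  exact pvSieveA1Size

lemma pvSieveA2Get (k : Nat) (hk : k < 1000001) :
    pvSieveA2[k]? = some (if 2 ≤ k then some (k : Int) else if k = 1 then some 1 else none) := by
  unfold pvSieveA2
  rw [pvSetFoldlGet _ _ _ (fun i hi => by
    rw [PySem.List.mem_pyRange_one] at hi
    refine ⟨by omega, ?_⟩
    rw [pvSieveA1Size]; omega) k]
  have hmem : ((k : Int) ∈ PySem.List.pyRange 2 1000001 1) ↔ (2 ≤ k) := by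
    rw [PySem.List.mem_pyRange_one]; omega
  simp only [hmem]
  by_cases h2 : 2 ≤ k
  · simp [h2]
  · simp [h2, pvSieveA1Get k hk]

lemma pvSieveA3Size : pvSieveA3.size = 1000001 := by
  unfold pvSieveA3
  rw [pvFoldlSize _ _ (fun a i => Array.size_setIfInBounds)]
  exact pvSieveA2Size

lemma pvSieveA3Get (k : Nat) (hk : k < 1000001) :
    pvSieveA3[k]? = some (if k = 0 then none else if k = 1 then some 1 else
      if 4 ≤ k ∧ 2 ∣ k then some 2 else some (k : Int)) := by
  unfold pvSieveA3
  rw [pvSetFoldlGet _ _ _ (fun i hi => by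
    rw [PySem.List.mem_pyRange_iff_of_pos (by norm_num)] at hi
    refine ⟨by omega, ?_⟩
    rw [pvSieveA2Size]; omega) k]
  have hmem : ((k : Int) ∈ PySem.List.pyRange 4 1000001 2) ↔ (4 ≤ k ∧ 2 ∣ k) := by
    rw [PySem.List.mem_pyRange_iff_of_pos (by norm_num)]; omega
  simp only [hmem]
  by_cases h4 : 4 ≤ k ∧ 2 ∣ k
  · simp [h4, show k ≠ 0 by omega, show k ≠ 1 by omega]
  · rw [if_neg h4, pvSieveA2Get k hk]
    by_cases h0 : k = 0
    · simp [h0]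
    · by_cases h1 : k = 1
      · simp [h0, h1]
      · simp [h0, h1, h4, show 2 ≤ k by omega]

lemma pvInvBase : PvInv pvSieveA3 3 := by
  refine ⟨pvSieveA3Size, ?_, ?_, ?_, ?_, ?_⟩
  · rw [pvSieveA3Get 0 (by norm_num)]; simp
  · rw [pvSieveA3Get 1 (by norm_num)]; simp
  · intro k h2 hS
    rw [pvSieveA3Get k hS]
    by_cases h4 : 4 ≤ k ∧ 2 ∣ k
    · exact ⟨2, by simp [show k ≠ 0 by omega, show k ≠ 1 by omega, h4],
        Or.inr ⟨Nat.prime_two, h4.2, by omega⟩⟩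
    · exact ⟨k, by simp [show k ≠ 0 by omega, show k ≠ 1 by omega, h4], Or.inl rfl⟩
  · intro k hS hkP
    have h2 : 2 ≤ k := hkP.two_le
    rw [pvSieveA3Get k hS]
    have h4 : ¬ (4 ≤ k ∧ 2 ∣ k) := by
      rintro ⟨h4, hdvd⟩
      rcases (Nat.Prime.eq_one_or_self_of_dvd hkP 2 hdvd) with h | h <;> omega
    simp [show k ≠ 0 by omega, show k ≠ 1 by omega, h4]
  · intro k h2 hS hnp hmf
    have hne1 : k ≠ 1 := by omega
    have hpmf := Nat.minFac_prime hne1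
    have h2mf : k.minFac = 2 := by have := hpmf.two_le; omega
    have hdvd : 2 ∣ k := h2mf ▸ Nat.minFac_dvd k
    have hk2 : k ≠ 2 := fun h => hnp (h ▸ Nat.prime_two)
    have h4 : 4 ≤ k := by omega
    rw [pvSieveA3Get k hS]
    simp [show k ≠ 0 by omega, hne1, h4, hdvd]
    omega
lemma pvInnerSize (a : Array (Option Int)) (i : Int) : (pvSieveInner a i).size = a.size := by
  unfold pvSieveInner
  exact pvFoldlSize _ _ (fun b j => by split <;> simp) a

lemma pvInvStep (a : Array (Option Int)) (i : Nat) (h3 : 3 ≤ i) (hi : i < 1000)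
    (hInv : PvInv a i) : PvInv (pvSieveStep a (i : Int)) (i + 1) := by
  obtain ⟨hsz, h0, h1, hGood, hP, hM⟩ := hInv
  unfold pvSieveStep
  simp only [Int.toNat_natCast]
  by_cases hc : a[i]? = some (some (i : Int))
  · rw [if_pos hc]
    have hiP : Nat.Prime i := by
      by_contra hnp
      have hd := Nat.minFac_dvd i
      have hp := Nat.minFac_prime (show i ≠ 1 by omega)
      have hle : i.minFac ≤ i := Nat.le_of_dvd (by omega) hd
      have hne : i.minFac ≠ i := fun h => hnp (h ▸ hp)
      exact hM i (by omega) (by omega) hnp (by omega) hc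
    have hipos : (0:Int) < (i:Int) := by exact_mod_cast (by omega : 0 < i)
    have hmemr : ∀ k : Nat, (((k : Int) ∈ PySem.List.pyRange ((i:Int)*(i:Int)) 1000001 (i:Int)) ↔
        (i*i ≤ k ∧ k < 1000001 ∧ i ∣ k)) := by
      intro k
      rw [PySem.List.mem_pyRange_iff_of_pos hipos]
      constructor
      · rintro ⟨ha, hb, hdvd⟩
        refine ⟨by exact_mod_cast ha, by exact_mod_cast hb, ?_⟩
        have h2' : (i:Int) ∣ (k:Int) := by
          have := dvd_add hdvd (dvd_mul_right (i:Int) (i:Int))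
          simpa using this
        exact_mod_cast h2'
      · rintro ⟨ha, hb, hdvd⟩
        exact ⟨by exact_mod_cast ha, by exact_mod_cast hb,
          dvd_sub (by exact_mod_cast hdvd) (dvd_mul_right _ _)⟩
    have hinner : ∀ k : Nat, (pvSieveInner a (i:Int))[k]? =
        if ((k : Int) ∈ PySem.List.pyRange ((i:Int)*(i:Int)) 1000001 (i:Int) ∧
            a[k]? = some (some (k : Int))) then some (some (i:Int)) else a[k]? := by
      intro k
      unfold pvSieveInner
      refine pvCondFoldlGet _ _ _ (fun j hj => ?_) k
      rw [PySem.List.mem_pyRange_iff_of_pos hipos] at hj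
      have hsq : (i:Int) < (i:Int)*(i:Int) := by nlinarith
      have hj1 : (i:Int) < j := lt_of_lt_of_le hsq hj.1
      exact ⟨by omega, by omega⟩
    refine ⟨by rw [pvInnerSize]; exact hsz, ?_, ?_, ?_, ?_, ?_⟩
    · rw [hinner 0, h0]
      simp
    · rw [hinner 1]
      have : ¬ ((124:Nat) = 0) := by norm_num
      have hno : ¬ ((1 : Int) ∈ PySem.List.pyRange ((i:Int)*(i:Int)) 1000001 (i:Int)) := by
        rw [show ((1:Int)) = ((1:Nat):Int) by norm_num, hmemr 1]
        rintro ⟨hle, -, -⟩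
        nlinarith
      simp [hno, h1]
    · intro k h2 hS
      rw [hinner k]
      split_ifs with h
      · obtain ⟨hmem, -⟩ := h
        rw [hmemr k] at hmem
        refine ⟨i, rfl, Or.inr ⟨hiP, hmem.2.2, ?_⟩⟩
        nlinarith [hmem.1]
      · exact hGood k h2 hS
    · intro k hS hkP
      rw [hinner k]
      split_ifs with h
      · exfalso
        obtain ⟨hmem, -⟩ := h
        rw [hmemr k] at hmem
        rcases (Nat.Prime.eq_one_or_self_of_dvd hkP i hmem.2.2) with h' | h'
        · omega
        · nlinarith [hmem.1]
      · exact hP k hS hkP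
    · intro k h2 hS hnp hmf
      rw [hinner k]
      split_ifs with h
      · obtain ⟨hmem, -⟩ := h
        rw [hmemr k] at hmem
        have hik : i < k := by nlinarith [hmem.1]
        simp only [ne_eq, Option.some.injEq, Int.natCast_inj]
        omega
      · rcases Nat.lt_or_ge (k.minFac) i with hlt | hge
        · exact hM k h2 hS hnp hlt
        · have heq : k.minFac = i := by omega
          intro hak
          apply h
          refine ⟨?_, hak⟩
          rw [hmemr k]
          have hsq : k.minFac ^ 2 ≤ k := Nat.minFac_sq_le_self (by omega) hnp
          refine ⟨by nlinarith [heq], by omega, heq ▸ Nat.minFac_dvd k⟩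
  · rw [if_neg hc]
    refine ⟨hsz, h0, h1, hGood, hP, ?_⟩
    intro k h2 hS hnp hmf
    rcases Nat.lt_or_ge (k.minFac) i with hlt | hge
    · exact hM k h2 hS hnp hlt
    · have heq : k.minFac = i := by omega
      have hip : Nat.Prime i := heq ▸ Nat.minFac_prime (show k ≠ 1 by omega)
      exact absurd (hP i (by omega) hip) hc
lemma pvInvOuter : ∀ m : Nat, 3 ≤ m → m ≤ 1000 →
    PvInv ((PySem.List.pyRange 3 (m : Int) 1).foldl pvSieveStep pvSieveA3) m := by
  intro m h3 h1000
  induction m, h3 using Nat.le_induction with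
  | base =>
    rw [PySem.List.pyRange_one_eq_nil (by norm_num), List.foldl_nil]
    exact pvInvBase
  | succ m hm ih =>
    rw [show ((m + 1 : Nat) : Int) = (m : Int) + 1 by push_cast; ring,
      PySem.List.pyRange_one_succ_right (by exact_mod_cast (by omega : 3 ≤ m)),
      List.foldl_append, List.foldl_cons, List.foldl_nil]
    exact pvInvStep _ m hm (by omega) (ih (by omega))

lemma pvSieveInv : PvInv pvSieve 1000 := by
  have h := pvInvOuter 1000 (by norm_num) le_rfl
  have : ((1000 : Nat) : Int) = (1000 : Int) := by norm_num
  rw [this] at h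
  exact h

lemma pvSieveFac (k : Nat) (h2 : 2 ≤ k) (hk : k < 1000001) :
    ∃ p : Nat, pvSieve[k]? = some (some (p : Int)) ∧ p.Prime ∧ p ∣ k := by
  obtain ⟨-, -, -, hGood, -, hM⟩ := pvSieveInv
  obtain ⟨p, hp, hdisj⟩ := hGood k h2 hk
  rcases hdisj with rfl | ⟨hprime, hdvd, -⟩
  · refine ⟨p, hp, ?_, dvd_refl p⟩
    by_contra hnp
    have hmf := Nat.minFac_prime (show p ≠ 1 by omega)
    have hsq : p.minFac ^ 2 ≤ p := Nat.minFac_sq_le_self (by omega) hnp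
    have hle : p.minFac ≤ 1000 := by nlinarith
    have hne : p.minFac ≠ 1000 := by
      intro h
      rw [h] at hmf
      exact absurd hmf (by norm_num)
    exact hM p h2 hk hnp (by omega) hp
  · exact ⟨p, hp, hprime, hdvd⟩

lemma pvSpfGetNonneg (a : Array (Option Int)) (i : Int) (h : 0 ≤ i) :
    pvSpfGet a i = match a[i.toNat]? with | some v => v | none => none := by
  unfold pvSpfGet
  rw [if_neg (by omega)]

lemma pvSpfGetOne : pvSpfGet pvSieve 1 = some 1 := by
  obtain ⟨-, -, hone, -, -, -⟩ := pvSieveInv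
  rw [pvSpfGetNonneg _ _ (by norm_num), show ((1:Int).toNat) = 1 by norm_num, hone]

lemma pvSpfGetSieve (num : Int) (h0 : 1 ≤ num) (hS : num < 1000001) :
    ∃ p : Nat, pvSpfGet pvSieve num = some (p : Int) ∧
      (num = 1 → p = 1) ∧ (2 ≤ num → p.Prime ∧ (p : Int) ∣ num) := by
  rcases eq_or_lt_of_le h0 with h1 | h2
  · refine ⟨1, ?_, fun _ => rfl, fun h => by omega⟩
    rw [← h1]
    exact_mod_cast pvSpfGetOne
  · have h2' : 2 ≤ num.toNat := by omega
    obtain ⟨p, hp, hprime, hdvd⟩ := pvSieveFac num.toNat h2' (by omega)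
    refine ⟨p, ?_, fun h => by omega, fun _ => ⟨hprime, ?_⟩⟩
    · rw [pvSpfGetNonneg _ _ (by omega), hp]
    · have hc : (p : Int) ∣ (num.toNat : Int) := by exact_mod_cast hdvd
      rwa [Int.toNat_of_nonneg (by omega)] at hc

lemma pvChainIffGen (spf : Array (Option Int))
    (hfac : ∀ num : Int, 1 ≤ num → num < 1000001 →
      ∃ p : Nat, pvSpfGet spf num = some (p : Int) ∧
        (num = 1 → p = 1) ∧ (2 ≤ num → p.Prime ∧ (p : Int) ∣ num))
    (map : PySem.Dict Int Int) (fuel : Nat) (num : Int)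
    (h1 : 1 ≤ num) (hS : num < 1000001) (hf : num.toNat ≤ fuel) :
    (pvChainA spf map fuel num = 1) ↔
      ∀ p : Nat, p.Prime → (p : Int) ∣ num → map.getD (p : Int) 0 = 1 := by
  induction fuel generalizing num with
  | zero => exact absurd h1 (by omega)
  | succ fuel ih =>
    obtain ⟨p, hsp, h1p, h2p⟩ := hfac num h1 hS
    simp only [pvChainA, hsp]
    rcases eq_or_lt_of_le h1 with hone | h2
    · rw [← hone]
      rw [if_neg (by simp)]
      constructor
      · intro _ q hq hqdvd
        have hq1 : q ∣ 1 := by exact_mod_cast hqdvd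
        exact absurd (Nat.dvd_one.mp hq1) hq.ne_one
      · intro _
        rfl
    · obtain ⟨hpP, hpdvd⟩ := h2p (by omega)
      have hp2 : (2:Int) ≤ (p:Int) := by exact_mod_cast hpP.two_le
      have hne1 : num ≠ 1 := by omega
      have hfd : PySem.Int.floordiv num (p:Int) = num / (p:Int) :=
        PySem.Int.floordiv_eq_ediv_of_pos (by omega)
      set num' := PySem.Int.floordiv num (p:Int) with hnum'
      have hmul : (p:Int) * num' = num := by rw [hfd]; exact Int.mul_ediv_cancel' hpdvd
      have h1' : 1 ≤ num' := by nlinarith [hmul]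
      have hlt : num' < num := by nlinarith [hmul]
      have hS' : num' < 1000001 := by omega
      have hf' : num'.toNat ≤ fuel := by omega
      by_cases hm : map.getD (p:Int) 0 = 1
      · rw [if_pos ⟨hne1, hm⟩, ih num' h1' hS' hf']
        constructor
        · intro h q hq hqdvd
          by_cases hqp : q = p
          · rw [hqp]; exact hm
          · apply h q hq
            have hqI : Prime (q:Int) := Nat.prime_iff_prime_int.mp hq
            have hqm : (q:Int) ∣ (p:Int) * num' := hmul ▸ hqdvd
            rcases hqI.dvd_mul.mp hqm with hqa | hqb
            · exact absurd ((Nat.prime_dvd_prime_iff_eq hq hpP).mp (by exact_mod_cast hqa)) hqp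
            · exact hqb
        · intro h q hq hqdvd
          exact h q hq (dvd_trans hqdvd ⟨(p:Int), by rw [← hmul]; ring⟩)
      · rw [if_neg (by rintro ⟨-, hmm⟩; exact hm hmm)]
        constructor
        · intro h; exact absurd h hne1
        · intro h; exact absurd (h p hpP hpdvd) hm

lemma pvChainIff (map : PySem.Dict Int Int) (fuel : Nat) (num : Int)
    (h1 : 1 ≤ num) (hS : num < 1000001) (hf : num.toNat ≤ fuel) :
    (pvChainA pvSieve map fuel num = 1) ↔
      ∀ p : Nat, p.Prime → (p : Int) ∣ num → map.getD (p : Int) 0 = 1 :=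
  pvChainIffGen pvSieve pvSpfGetSieve map fuel num h1 hS hf

lemma pvStripSpec (fuel : Nat) (x d : Int) (h1 : 1 ≤ x) (hdp : Prime d) (hd2 : 2 ≤ d)
    (hf : x.toNat ≤ fuel) :
    1 ≤ pvStrip fuel x d ∧ ¬ d ∣ pvStrip fuel x d ∧
      (∀ p : Int, p ∣ pvStrip fuel x d → p ∣ x) ∧
      (∀ p : Nat, p.Prime → (p : Int) ∣ x → ((p : Int) = d ∨ (p : Int) ∣ pvStrip fuel x d)) := by
  induction fuel generalizing x with
  | zero => exact absurd h1 (by omega)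
  | succ fuel ih =>
    simp only [pvStrip]
    by_cases hdvd : PySem.Int.mod x d = 0
    · rw [if_pos hdvd]
      have hdd : d ∣ x := (PySem.Int.mod_eq_zero_iff_dvd x d).mp hdvd
      have hfd : PySem.Int.floordiv x d = x / d := PySem.Int.floordiv_eq_ediv_of_pos (by omega)
      have hmul : d * PySem.Int.floordiv x d = x := by
        rw [hfd]; exact Int.mul_ediv_cancel' hdd
      have h1' : 1 ≤ PySem.Int.floordiv x d := by
        by_contra hcon
        push_neg at hcon
        have hle := mul_le_mul_of_nonneg_left (show PySem.Int.floordiv x d ≤ 0 by omega)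
          (show (0:Int) ≤ d by omega)
        rw [hmul] at hle
        simp at hle
        omega
      have hlt : PySem.Int.floordiv x d < x := by nlinarith [hmul, h1, hd2, h1']
      obtain ⟨ih1, ih2, ih3, ih4⟩ := ih (PySem.Int.floordiv x d) h1' (by omega)
      have hfx : PySem.Int.floordiv x d ∣ x := by
        refine ⟨d, ?_⟩
        conv_lhs => rw [← hmul]
        ring
      refine ⟨ih1, ih2, fun p hp => dvd_trans (ih3 p hp) hfx, ?_⟩
      intro p hp hpx
      by_cases hpd : (p : Int) = d
      · exact Or.inl hpd
      · have hq : Prime (p : Int) := Nat.prime_iff_prime_int.mp hp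
        have hpm : (p : Int) ∣ d * PySem.Int.floordiv x d := by rw [hmul]; exact hpx
        rcases hq.dvd_mul.mp hpm with ha | hb
        · exfalso
          apply hpd
          rcases Int.associated_iff.mp (hq.associated_of_dvd hdp ha) with h' | h'
          · exact h'
          · have : (0:Int) ≤ (p:Int) := by positivity
            omega
        · rcases ih4 p hp hb with hL | hR
          · exact Or.inl hL
          · exact Or.inr hR
    · rw [if_neg hdvd]
      have hnd : ¬ d ∣ x := fun h => hdvd ((PySem.Int.mod_eq_zero_iff_dvd x d).mpr h)
      exact ⟨h1, hnd, fun p hp => hp, fun p hp hpx => Or.inr hpx⟩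

lemma pvCheckExit (present : PySem.Set Int) (x d : Int) (h1 : 1 ≤ x) (hd : 2 ≤ d)
    (hbig : x < d * d)
    (hmin : ∀ p : Nat, p.Prime → (p : Int) ∣ x → d ≤ (p : Int)) :
    ((decide (x = 1) || present.contains x) = true ↔
      ∀ p : Nat, p.Prime → (p : Int) ∣ x → (p : Int) ∈ present) := by
  have hxcast : ((x.toNat : Nat) : Int) = x := Int.toNat_of_nonneg (by omega)
  rcases eq_or_lt_of_le h1 with hone | h2
  · constructor
    · intro _ q hq hqdvd
      rw [← hone] at hqdvd
      have hq1 : q ∣ 1 := by exact_mod_cast hqdvd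
      exact absurd (Nat.dvd_one.mp hq1) hq.ne_one
    · intro _
      simp [← hone]
  · have hxP : Nat.Prime x.toNat := by
      by_contra hnp
      have hmf := Nat.minFac_prime (show x.toNat ≠ 1 by omega)
      have hdvd0 : (x.toNat.minFac : Int) ∣ x := by
        have h' : (x.toNat.minFac : Int) ∣ (x.toNat : Int) := by exact_mod_cast Nat.minFac_dvd _
        rwa [hxcast] at h'
      have hge := hmin _ hmf hdvd0
      have hsq : x.toNat.minFac ^ 2 ≤ x.toNat := Nat.minFac_sq_le_self (by omega) hnp
      have hsq' : ((x.toNat.minFac : Int)) ^ 2 ≤ x := by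
        rw [← hxcast]; exact_mod_cast hsq
      nlinarith [hge, hsq']
    have hx1 : ¬ (x = 1) := by omega
    constructor
    · intro hL q hq hqdvd
      have hq' : q = x.toNat := by
        have hdq : (q : Int) ∣ (x.toNat : Int) := by rwa [hxcast]
        exact (Nat.prime_dvd_prime_iff_eq hq hxP).mp (by exact_mod_cast hdq)
      rw [hq', hxcast]
      simp only [hx1, decide_false, Bool.false_or] at hL
      exact (PySem.Set.contains_iff present x).mp hL
    · intro hR
      have hmem := hR x.toNat hxP (by rw [hxcast])
      rw [hxcast] at hmem
      simp only [Bool.or_eq_true]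
      exact Or.inr ((PySem.Set.contains_iff present x).mpr hmem)

lemma pvCheckIff (present : PySem.Set Int) (fuel : Nat) (x d : Int)
    (h1 : 1 ≤ x) (hd : 2 ≤ d)
    (hmin : ∀ p : Nat, p.Prime → (p : Int) ∣ x → d ≤ (p : Int))
    (hf : 2 * x.toNat + 2 ≤ fuel + d.toNat) :
    (pvCheck present fuel x d = true) ↔
      ∀ p : Nat, p.Prime → (p : Int) ∣ x → (p : Int) ∈ present := by
  induction fuel generalizing x d with
  | zero =>
    have hbig : x < d * d := by
      have hd1 : 2 * x + 2 ≤ d := by omega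
      nlinarith [hd1]
    simp only [pvCheck]
    exact pvCheckExit present x d h1 hd hbig hmin
  | succ fuel ih =>
    simp only [pvCheck]
    by_cases hdx : d * d ≤ x
    · rw [if_pos hdx]
      by_cases hmod : PySem.Int.mod x d = 0
      · rw [if_pos hmod]
        have hdd : d ∣ x := (PySem.Int.mod_eq_zero_iff_dvd x d).mp hmod
        have hdcast : ((d.toNat : Nat) : Int) = d := Int.toNat_of_nonneg (by omega)
        have hdP : Nat.Prime d.toNat := by
          by_contra hnp
          have hmf := Nat.minFac_prime (show d.toNat ≠ 1 by omega)
          have hmd : d.toNat.minFac ∣ d.toNat := Nat.minFac_dvd _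
          have hmle : d.toNat.minFac ≤ d.toNat := Nat.le_of_dvd (by omega) hmd
          have hmlt : d.toNat.minFac < d.toNat := lt_of_le_of_ne hmle (fun h => hnp (h ▸ hmf))
          have hcast : (d.toNat.minFac : Int) ∣ x := by
            refine dvd_trans ?_ hdd
            rw [← hdcast]
            exact_mod_cast hmd
          have hge := hmin _ hmf hcast
          omega
        have hdI : Prime d := by
          have h' := Nat.prime_iff_prime_int.mp hdP
          rwa [hdcast] at h'
        by_cases hc : present.contains d
        · rw [if_pos hc]
          obtain ⟨hs1, hs2, hs3, hs4⟩ := pvStripSpec (x.toNat + 1) x d h1 hdI hd (by omega)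
          have hx'dvd : pvStrip (x.toNat + 1) x d ∣ x := hs3 _ dvd_rfl
          have hx'ne : pvStrip (x.toNat + 1) x d ≠ x := fun h => hs2 (by rw [h]; exact hdd)
          have hx'lt : pvStrip (x.toNat + 1) x d < x :=
            lt_of_le_of_ne (Int.le_of_dvd (by omega) hx'dvd) hx'ne
          have hmin' : ∀ p : Nat, p.Prime → (p:Int) ∣ pvStrip (x.toNat + 1) x d → d + 1 ≤ (p:Int) := by
            intro p hp hpx'
            have hge := hmin p hp (hs3 _ hpx')
            have hne : (p:Int) ≠ d := fun h => hs2 (by rw [h] at hpx'; exact hpx')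
            omega
          rw [ih (pvStrip (x.toNat + 1) x d) (d+1) hs1 (by omega) hmin' (by omega)]
          constructor
          · intro h q hq hqdvd
            rcases hs4 q hq hqdvd with hqd | hqx'
            · rw [hqd]; exact (PySem.Set.contains_iff present d).mp hc
            · exact h q hq hqx'
          · intro h q hq hqx'
            exact h q hq (hs3 _ hqx')
        · rw [if_neg hc]
          constructor
          · intro h; cases h
          · intro h
            exfalso
            have hmem := h d.toNat hdP (by rw [hdcast]; exact hdd)
            rw [hdcast] at hmem
            exact hc ((PySem.Set.contains_iff present d).mpr hmem)
      · rw [if_neg hmod]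
        have hnd : ¬ d ∣ x := fun h => hmod ((PySem.Int.mod_eq_zero_iff_dvd x d).mpr h)
        have hmin' : ∀ p : Nat, p.Prime → (p:Int) ∣ x → d + 1 ≤ (p:Int) := by
          intro p hp hpx
          have hge := hmin p hp hpx
          have hne : (p:Int) ≠ d := fun h => hnd (by rw [h] at hpx; exact hpx)
          omega
        exact ih x (d+1) h1 (by omega) hmin' (by omega)
    · rw [if_neg hdx]
      exact pvCheckExit present x d h1 hd (by omega) hmin

lemma pvFoldTake {β : Type} (arr : List Int) (n : Int) (hn : n ≤ (arr.length : Int))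
    (g : β → Int → β) (init : β) :
    (PySem.List.pyRange 0 n 1).foldl (fun acc i => g acc (PySem.List.pyGetD arr i 0)) init =
      (arr.take n.toNat).foldl g init := by
  by_cases hn0 : n ≤ 0
  · rw [PySem.List.pyRange_one_eq_nil hn0]
    have h0 : n.toNat = 0 := by omega
    simp [h0]
  · have hn0' : 0 < n := by omega
    obtain ⟨m, rfl⟩ : ∃ m : Nat, n = (m : Int) := ⟨n.toNat, by omega⟩
    have hm : m ≤ arr.length := by exact_mod_cast hn
    clear hn hn0 hn0'
    induction m with
    | zero => simp [PySem.List.pyRange_one_eq_nil]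
    | succ m ih =>
      have hm' : m ≤ arr.length := by omega
      rw [show ((m + 1 : Nat) : Int) = (m : Int) + 1 by push_cast; ring,
        PySem.List.pyRange_one_succ_right (by positivity), List.foldl_append, ih hm']
      have hlt : m < arr.length := by omega
      have hg : PySem.List.pyGetD arr (m : Int) 0 = arr[m] := by
        simp [PySem.List.pyGetD_natCast, List.getD_eq_getElem?_getD, hlt,
          List.getElem?_eq_getElem hlt]
      rw [List.foldl_cons, List.foldl_nil, hg,
        show ((m : Int) + 1).toNat = m + 1 by omega,
        show ((m : Int)).toNat = m by omega]
      conv_rhs => rw [List.take_add_one, List.getElem?_eq_getElem hlt]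
      rw [Option.toList_some, List.foldl_append, List.foldl_cons, List.foldl_nil]

lemma pvMapGetD (l : List Int) (p : Int) (d : PySem.Dict Int Int) :
    (l.foldl (fun d x => d.insert x (1 : Int)) d).getD p 0 = if p ∈ l then 1 else d.getD p 0 := by
  induction l generalizing d with
  | nil => simp
  | cons x t ih =>
    rw [List.foldl_cons, ih]
    by_cases hpt : p ∈ t
    · simp [hpt]
    · by_cases hpx : p = x
      · simp [hpt, hpx, PySem.Dict.getD_insert]
      · simp [hpt, hpx, PySem.Dict.getD_insert]

lemma pvSumCongrP (l : List Int) (pA pB : Int → Prop) [DecidablePred pA] [DecidablePred pB]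
    (h : ∀ x ∈ l, x = 0 ∨ (pA x ↔ pB x)) (init : Int) :
    l.foldl (fun s x => if pA x then s + x else s) init =
      l.foldl (fun s x => if pB x then s + x else s) init := by
  induction l generalizing init with
  | nil => rfl
  | cons x t ih =>
    rw [List.foldl_cons, List.foldl_cons]
    have hstep : (if pA x then init + x else init) = (if pB x then init + x else init) := by
      rcases h x (by simp) with h0 | heq
      · subst h0; split <;> split <;> simp
      · by_cases hx : pA x
        · rw [if_pos hx, if_pos (heq.mp hx)]
        · rw [if_neg hx, if_neg (fun hbx => hx (heq.mpr hbx))]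
    rw [hstep]
    exact ih (fun y hy => h y (by simp [hy])) _

-- ===== VERDICT (by name: the statement is the Claim_ definition above) =====
theorem sumFactors_spec : Claim_equal_sumFactors := by
  unfold Claim_equal_sumFactors Spec_sumFactors
  intro arr n hdom hpre
  obtain ⟨hn, helts⟩ := hpre
  rw [PySem.List.len_eq] at hn
  simp only [sumFactors, sumFactors_alt]
  by_cases hn0 : n ≤ 0
  · rw [PySem.List.pyRange_one_eq_nil hn0]
    simp only [List.foldl_nil]
  · have hslice : PySem.List.slice arr none (some n) = arr.take n.toNat :=
      PySem.List.slice_to arr (by omega)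
    rw [hslice]
    rw [pvFoldTake arr n hn (fun d v => d.insert v (1:Int)) PySem.Dict.empty]
    rw [pvFoldTake arr n hn (fun s v =>
      if pvChainA pvSieve ((arr.take n.toNat).foldl (fun d v => d.insert v (1:Int)) PySem.Dict.empty)
          (v.toNat + 1) v = 1 then s + v else s) 0]
    rw [pvFoldTake arr n hn (fun s v =>
      if pvCheck (PySem.Set.ofList (arr.take n.toNat)) (2 * v.toNat + 2) v 2 = true
      then s + v else s) 0]
    refine pvSumCongrP _ _ _ (fun x hx => ?_) 0
    obtain ⟨hx0, hxS⟩ := helts x hx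
    rcases eq_or_lt_of_le hx0 with hz | hx1
    · exact Or.inl hz.symm
    · right
      rw [pvChainIff _ (x.toNat + 1) x hx1 hxS (by omega)]
      rw [pvCheckIff _ (2 * x.toNat + 2) x 2 hx1 (by norm_num)
        (fun p hp _ => by exact_mod_cast hp.two_le) (by omega)]
      constructor
      · intro h p hp hdvd
        have hm := h p hp hdvd
        rw [pvMapGetD] at hm
        by_cases hmem : (p:Int) ∈ arr.take n.toNat
        · exact (PySem.Set.mem_ofList _ _).mpr hmem
        · rw [if_neg hmem] at hm
          simp [PySem.Dict.getD_empty] at hm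
      · intro h p hp hdvd
        rw [pvMapGetD, if_pos ((PySem.Set.mem_ofList _ _).mp (h p hp hdvd))]
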